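-- pv_equiv track=rewrite | github.com/Ranjit2111/AI-Interview-Agent | backend/agents/skill_assessor.py | _estimate_proficiency
-- ===== SOURCE A (Python) =====
-- from enum import Enum
--
-- class ProficiencyLevel(str, Enum):
--     """Enum for skill proficiency levels."""
--     NOVICE = "novice"
--     BASIC = "basic"
--     INTERMEDIATE = "intermediate"
--     ADVANCED = "advanced"
--     EXPERT = "expert"
--
-- def _estimate_proficiency(skill: str, text: str) -> ProficiencyLevel:
--     """
--     Estimate the proficiency level for a skill based on the text.
--
--     Args:
--         skill: The skill to estimate proficiency for
--         text: The text to analyze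
--
--     Returns:
--         Estimated proficiency level
--     """
--     # Look for indicators of proficiency
--     novice_indicators = [f"beginning to learn {skill}", f"just started {skill}",
--                          f"novice {skill}", f"basic understanding of {skill}"]
--
--     basic_indicators = [f"familiar with {skill}", f"worked with {skill} a bit",
--                        f"some experience in {skill}", f"understand {skill}"]
--
--     intermediate_indicators = [f"good knowledge of {skill}", f"worked with {skill}",
--                              f"{skill} experience", f"used {skill} in projects"]
--
--     advanced_indicators = [f"extensive experience in {skill}", f"advanced {skill}",
--                          f"very comfortable with {skill}", f"expert in {skill}",
--                          f"mastery of {skill}", f"deep knowledge of {skill}"]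
--
--     # Check for proficiency indicators
--     for indicator in advanced_indicators:
--         if indicator in text:
--             return ProficiencyLevel.ADVANCED
--
--     for indicator in intermediate_indicators:
--         if indicator in text:
--             return ProficiencyLevel.INTERMEDIATE
--
--     for indicator in basic_indicators:
--         if indicator in text:
--             return ProficiencyLevel.BASIC
--
--     for indicator in novice_indicators:
--         if indicator in text:
--             return ProficiencyLevel.NOVICE
--
--     # Default to intermediate if no clear indicators
--     return ProficiencyLevel.INTERMEDIATE
-- ===== SOURCE B (Python) =====
-- from enum import Enum
--
-- class ProficiencyLevel(str, Enum):
--     """Enum for skill proficiency levels."""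
--     NOVICE = "novice"
--     BASIC = "basic"
--     INTERMEDIATE = "intermediate"
--     ADVANCED = "advanced"
--     EXPERT = "expert"
--
-- # (prefix, suffix, rank): every indicator phrase has the shape prefix + skill + suffix;
-- # rank 0 = novice, 1 = basic, 2 = intermediate, 3 = advanced.
-- _TABLE = [
--     ("beginning to learn ", "", 0), ("just started ", "", 0),
--     ("novice ", "", 0), ("basic understanding of ", "", 0),
--     ("familiar with ", "", 1), ("worked with ", " a bit", 1),
--     ("some experience in ", "", 1), ("understand ", "", 1),
--     ("good knowledge of ", "", 2), ("worked with ", "", 2),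
--     ("", " experience", 2), ("used ", " in projects", 2),
--     ("extensive experience in ", "", 3), ("advanced ", "", 3),
--     ("very comfortable with ", "", 3), ("expert in ", "", 3),
--     ("mastery of ", "", 3), ("deep knowledge of ", "", 3),
-- ]
--
-- def _estimate_proficiency(skill: str, text: str) -> ProficiencyLevel:
--     # Occurrence-driven scan: walk the occurrences of `skill` inside `text`; at
--     # each occurrence match the surrounding context (what precedes / follows the
--     # skill) against the (prefix, suffix, rank) context table and keep the numeric
--     # maximum rank seen; finally map the max rank back to a level (-1 = no match).
--     best = -1
--     for i in range(len(text) - len(skill) + 1):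
--         if text.startswith(skill, i):
--             pre = text[:i]
--             post = text[i + len(skill):]
--             for p, s, r in _TABLE:
--                 if pre.endswith(p) and post.startswith(s):
--                     best = max(best, r)
--     if best == 3:
--         return ProficiencyLevel.ADVANCED
--     if best == 2:
--         return ProficiencyLevel.INTERMEDIATE
--     if best == 1:
--         return ProficiencyLevel.BASIC
--     if best == 0:
--         return ProficiencyLevel.NOVICE
--     return ProficiencyLevel.INTERMEDIATE
-- ===== Notes on version B (the rewrite author's own statement) =====
-- stated objective: alternative
-- what changed: Instead of A's four ordered early-return loops testing 18 whole indicator phrases for substring membership, B scans the occurrences of the skill inside the text, matches the context before/after each occurrence against a flat (prefix, suffix, rank) table, keeps the numeric maximum rank seen, and maps that max back to a level (-1 = no match = intermediate).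
import Mathlib
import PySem

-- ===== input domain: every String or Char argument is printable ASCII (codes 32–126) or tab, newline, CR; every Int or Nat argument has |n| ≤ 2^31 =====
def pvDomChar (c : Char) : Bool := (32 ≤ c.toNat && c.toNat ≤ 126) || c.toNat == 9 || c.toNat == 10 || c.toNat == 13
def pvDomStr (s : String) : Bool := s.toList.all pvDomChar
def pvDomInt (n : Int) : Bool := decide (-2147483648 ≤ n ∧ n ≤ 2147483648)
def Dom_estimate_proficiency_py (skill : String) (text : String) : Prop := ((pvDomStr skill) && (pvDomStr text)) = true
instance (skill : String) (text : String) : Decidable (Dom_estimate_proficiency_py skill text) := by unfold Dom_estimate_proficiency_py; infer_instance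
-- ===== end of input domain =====

-- B replaces A's 18 per-phrase substring-membership tests in four ordered early-return loops by an
-- occurrence-driven scan: it walks the occurrences of `skill` inside `text`, matches the context
-- around each occurrence against a flat (prefix, suffix, rank) table, keeps the numeric maximum
-- rank, and maps it back to a level (objective: alternative algorithm; similar cost).

-- ===== PORT A =====
-- A's 'for indicator in …: if indicator in text: return …' loop, one group at a time
def pvScanA (text : String) : List String → Bool
  | [] => false
  | ind :: rest => if PySem.Str.isIn ind text then true else pvScanA text rest

def estimate_proficiency_py (skill : String) (text : String) : String :=
  let novice_indicators := ["beginning to learn " ++ skill, "just started " ++ skill,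
                            "novice " ++ skill, "basic understanding of " ++ skill]
  let basic_indicators := ["familiar with " ++ skill, "worked with " ++ skill ++ " a bit",
                           "some experience in " ++ skill, "understand " ++ skill]
  let intermediate_indicators := ["good knowledge of " ++ skill, "worked with " ++ skill,
                                  skill ++ " experience", "used " ++ skill ++ " in projects"]
  let advanced_indicators := ["extensive experience in " ++ skill, "advanced " ++ skill,
                              "very comfortable with " ++ skill, "expert in " ++ skill,
                              "mastery of " ++ skill, "deep knowledge of " ++ skill]
  if pvScanA text advanced_indicators then "advanced"
  else if pvScanA text intermediate_indicators then "intermediate"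
  else if pvScanA text basic_indicators then "basic"
  else if pvScanA text novice_indicators then "novice"
  else "intermediate"

-- ===== PORT B =====
-- B's _TABLE: (prefix, suffix, rank); every indicator phrase is prefix + skill + suffix
def pvTable : List (List Char × List Char × Int) :=
  [("beginning to learn ".toList, [], 0), ("just started ".toList, [], 0),
   ("novice ".toList, [], 0), ("basic understanding of ".toList, [], 0),
   ("familiar with ".toList, [], 1), ("worked with ".toList, " a bit".toList, 1),
   ("some experience in ".toList, [], 1), ("understand ".toList, [], 1),
   ("good knowledge of ".toList, [], 2), ("worked with ".toList, [], 2),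
   ([], " experience".toList, 2), ("used ".toList, " in projects".toList, 2),
   ("extensive experience in ".toList, [], 3), ("advanced ".toList, [], 3),
   ("very comfortable with ".toList, [], 3), ("expert in ".toList, [], 3),
   ("mastery of ".toList, [], 3), ("deep knowledge of ".toList, [], 3)]

-- B's inner-loop condition: pre.endswith(p) and post.startswith(s)
def pvCtx (t sk : List Char) (i : Nat) (e : List Char × List Char × Int) : Bool :=
  PySem.Chars.endswith (t.take i) e.1 && PySem.Chars.startswith (t.drop (i + sk.length)) e.2.1

-- B's outer-loop body: if text.startswith(skill, i): for (p,s,r) in _TABLE: if ctx: best = max(best, r)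
def pvStep (t sk : List Char) (b : Int) (i : Nat) : Int :=
  if PySem.Chars.startswith (t.drop i) sk then
    pvTable.foldl (fun b e => if pvCtx t sk i e then max b e.2.2 else b) b
  else b

def estimate_proficiency_py_alt (skill : String) (text : String) : String :=
  let sk := skill.toList
  let t := text.toList
  let best := (List.range (t.length + 1 - sk.length)).foldl (pvStep t sk) (-1 : Int)
  if best == 3 then "advanced"
  else if best == 2 then "intermediate"
  else if best == 1 then "basic"
  else if best == 0 then "novice"
  else "intermediate"

-- ===== PRECONDITION & SPEC =====
def Spec_estimate_proficiency_py (skill : String) (text : String) (out : String) : Prop := out = estimate_proficiency_py_alt skill text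
instance (skill : String) (text : String) (out : String) : Decidable (Spec_estimate_proficiency_py skill text out) := by unfold Spec_estimate_proficiency_py; infer_instance

-- ===== CLAIM (what is proved, stated in full; the proofs are below) =====
def Claim_equal_estimate_proficiency_py : Prop := ∀ (skill : String) (text : String), Dom_estimate_proficiency_py skill text → Spec_estimate_proficiency_py skill text (estimate_proficiency_py skill text)

-- ===== LEMMAS AND PROOFS =====

lemma scanA_eq_any (text : String) (l : List String) :
    pvScanA text l = l.any (fun ind => PySem.Str.isIn ind text) := by
  induction l with
  | nil => rfl
  | cons x xs ih => cases h : PySem.Str.isIn x text <;> simp_all [pvScanA]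

-- the four rank groups of pvTable
def pvG0 : List (List Char × List Char × Int) :=
  [("beginning to learn ".toList, [], 0), ("just started ".toList, [], 0),
   ("novice ".toList, [], 0), ("basic understanding of ".toList, [], 0)]
def pvG1 : List (List Char × List Char × Int) :=
  [("familiar with ".toList, [], 1), ("worked with ".toList, " a bit".toList, 1),
   ("some experience in ".toList, [], 1), ("understand ".toList, [], 1)]
def pvG2 : List (List Char × List Char × Int) :=
  [("good knowledge of ".toList, [], 2), ("worked with ".toList, [], 2),
   ([], " experience".toList, 2), ("used ".toList, " in projects".toList, 2)]
def pvG3 : List (List Char × List Char × Int) :=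
  [("extensive experience in ".toList, [], 3), ("advanced ".toList, [], 3),
   ("very comfortable with ".toList, [], 3), ("expert in ".toList, [], 3),
   ("mastery of ".toList, [], 3), ("deep knowledge of ".toList, [], 3)]

lemma pvTable_eq : pvTable = pvG0 ++ pvG1 ++ pvG2 ++ pvG3 := rfl

-- the rank contributed by position i
def pvRank (t sk : List Char) (i : Nat) : Int :=
  if PySem.Chars.startswith (t.drop i) sk && pvG3.any (pvCtx t sk i) then 3
  else if PySem.Chars.startswith (t.drop i) sk && pvG2.any (pvCtx t sk i) then 2
  else if PySem.Chars.startswith (t.drop i) sk && pvG1.any (pvCtx t sk i) then 1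
  else if PySem.Chars.startswith (t.drop i) sk && pvG0.any (pvCtx t sk i) then 0
  else -1

-- the max rank over a list of positions
def pvMR (t sk : List Char) (l : List Nat) : Int :=
  if l.any (fun i => PySem.Chars.startswith (t.drop i) sk && pvG3.any (pvCtx t sk i)) then 3
  else if l.any (fun i => PySem.Chars.startswith (t.drop i) sk && pvG2.any (pvCtx t sk i)) then 2
  else if l.any (fun i => PySem.Chars.startswith (t.drop i) sk && pvG1.any (pvCtx t sk i)) then 1
  else if l.any (fun i => PySem.Chars.startswith (t.drop i) sk && pvG0.any (pvCtx t sk i)) then 0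
  else -1

lemma foldl_maxif_const {α : Type} (P : α → Bool) (r : Int) (g : List α)
    (f : α → Int) (hf : ∀ e ∈ g, f e = r) (m : Int) :
    g.foldl (fun b e => if P e then max b (f e) else b) m = if g.any P then max m r else m := by
  induction g generalizing m with
  | nil => simp
  | cons a g ih =>
    have ha : f a = r := hf a (by simp)
    have ih' := ih (fun e he => hf e (by simp [he]))
    cases hp : P a with
    | true =>
      simp only [List.foldl_cons, List.any_cons, hp, Bool.true_or, if_true, ha, ih']
      cases hg : g.any P <;> simp
    | false => simp [hp, ih']

-- pure cascade arithmetic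
lemma pvStack_max (b : Int) (hb : -1 ≤ b) (g0 g1 g2 g3 : Bool) :
    (if g3 then max (if g2 then max (if g1 then max (if g0 then max b 0 else b) 1
                                     else (if g0 then max b 0 else b)) 2
                     else (if g1 then max (if g0 then max b 0 else b) 1
                           else (if g0 then max b 0 else b))) 3
     else (if g2 then max (if g1 then max (if g0 then max b 0 else b) 1
                           else (if g0 then max b 0 else b)) 2
           else (if g1 then max (if g0 then max b 0 else b) 1
                 else (if g0 then max b 0 else b))))
    = max b (if g3 then 3 else if g2 then 2 else if g1 then 1 else if g0 then 0 else -1) := by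
  cases g0 <;> cases g1 <;> cases g2 <;> cases g3
  all_goals try simp
  all_goals omega

lemma pvCascade_cons (c3 c2 c1 c0 a3 a2 a1 a0 : Bool) :
    (if (c3 || a3) then (3:Int) else if (c2 || a2) then 2 else if (c1 || a1) then 1
     else if (c0 || a0) then 0 else -1)
    = max (if c3 then 3 else if c2 then 2 else if c1 then 1 else if c0 then 0 else -1)
          (if a3 then 3 else if a2 then 2 else if a1 then 1 else if a0 then 0 else -1) := by
  revert c3 c2 c1 c0 a3 a2 a1 a0; decide

lemma pvFinal_cascade (a3 a2 a1 a0 : Bool) :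
    (if a3 then "advanced" else if a2 then "intermediate" else if a1 then "basic"
     else if a0 then "novice" else "intermediate")
    = (if ((if a3 then (3:Int) else if a2 then 2 else if a1 then 1 else if a0 then 0 else -1) == 3) then "advanced"
       else if ((if a3 then (3:Int) else if a2 then 2 else if a1 then 1 else if a0 then 0 else -1) == 2) then "intermediate"
       else if ((if a3 then (3:Int) else if a2 then 2 else if a1 then 1 else if a0 then 0 else -1) == 1) then "basic"
       else if ((if a3 then (3:Int) else if a2 then 2 else if a1 then 1 else if a0 then 0 else -1) == 0) then "novice"
       else "intermediate") := by
  revert a3 a2 a1 a0; decide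

lemma pvRank_of_not_starts (t sk : List Char) (i : Nat)
    (h : PySem.Chars.startswith (t.drop i) sk = false) : pvRank t sk i = -1 := by
  simp [pvRank, h]

lemma pvStep_eq_max (t sk : List Char) (b : Int) (i : Nat) (hb : -1 ≤ b) :
    pvStep t sk b i = max b (pvRank t sk i) := by
  unfold pvStep
  cases hs : PySem.Chars.startswith (t.drop i) sk with
  | false => rw [if_neg (by simp), pvRank_of_not_starts t sk i hs, max_eq_left hb]
  | true =>
    rw [if_pos rfl, pvTable_eq, List.foldl_append, List.foldl_append, List.foldl_append]
    rw [foldl_maxif_const (pvCtx t sk i) 0 pvG0 (fun e => e.2.2) (by decide)]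
    rw [foldl_maxif_const (pvCtx t sk i) 1 pvG1 (fun e => e.2.2) (by decide)]
    rw [foldl_maxif_const (pvCtx t sk i) 2 pvG2 (fun e => e.2.2) (by decide)]
    rw [foldl_maxif_const (pvCtx t sk i) 3 pvG3 (fun e => e.2.2) (by decide)]
    simp only [pvRank, hs, Bool.true_and]
    exact pvStack_max b hb _ _ _ _

lemma pvMR_cons (t sk : List Char) (i : Nat) (l : List Nat) :
    pvMR t sk (i :: l) = max (pvRank t sk i) (pvMR t sk l) := by
  simp only [pvMR, pvRank, List.any_cons]
  exact pvCascade_cons _ _ _ _ _ _ _ _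

lemma neg_one_le_pvMR (t sk : List Char) (l : List Nat) : -1 ≤ pvMR t sk l := by
  unfold pvMR; split_ifs <;> omega

lemma foldl_pvStep (t sk : List Char) (l : List Nat) (b : Int) (hb : -1 ≤ b) :
    l.foldl (pvStep t sk) b = max b (pvMR t sk l) := by
  induction l generalizing b with
  | nil => simp only [List.foldl_nil]; rw [show pvMR t sk [] = -1 by simp [pvMR]]; omega
  | cons i l ih =>
    rw [List.foldl_cons, pvStep_eq_max t sk b i hb,
        ih (max b (pvRank t sk i)) (le_trans hb (le_max_left _ _)),
        pvMR_cons, max_assoc]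

-- occurrence characterisation: prefix+skill+suffix occurs in t iff some position i
-- carries skill with the right context around it
lemma entry_iff (t sk p s : List Char) :
    (p ++ sk ++ s) <:+: t ↔
      ∃ i, i < t.length + 1 - sk.length ∧
        PySem.Chars.startswith (t.drop i) sk = true ∧
        PySem.Chars.endswith (t.take i) p = true ∧
        PySem.Chars.startswith (t.drop (i + sk.length)) s = true := by
  constructor
  · rintro ⟨u, v, rfl⟩
    have hT : u ++ (p ++ sk ++ s) ++ v = (u ++ p) ++ (sk ++ (s ++ v)) := by
      simp [List.append_assoc]
    refine ⟨u.length + p.length, ?_, ?_, ?_, ?_⟩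
    · simp only [List.length_append]; omega
    · rw [PySem.Chars.startswith_iff, hT,
          show u.length + p.length = (u ++ p).length by simp, List.drop_left]
      exact ⟨s ++ v, rfl⟩
    · rw [PySem.Chars.endswith_iff, hT,
          show u.length + p.length = (u ++ p).length by simp, List.take_left]
      exact ⟨u, rfl⟩
    · rw [PySem.Chars.startswith_iff, hT,
          show (u ++ p) ++ (sk ++ (s ++ v)) = ((u ++ p) ++ sk) ++ (s ++ v) by
            simp [List.append_assoc],
          show u.length + p.length + sk.length = ((u ++ p) ++ sk).length by
            simp only [List.length_append],
          List.drop_left]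
      exact ⟨v, rfl⟩
  · rintro ⟨i, _, hsk, hp, hs⟩
    rw [PySem.Chars.startswith_iff] at hsk hs
    rw [PySem.Chars.endswith_iff] at hp
    obtain ⟨u, hu⟩ := hp
    obtain ⟨r1, hr1⟩ := hsk
    have hdd : t.drop (i + sk.length) = r1 := by
      rw [← List.drop_drop, ← hr1, List.drop_left]
    obtain ⟨r2, hr2⟩ := hs
    rw [hdd] at hr2
    refine ⟨u, r2, ?_⟩
    calc u ++ (p ++ sk ++ s) ++ r2 = (u ++ p) ++ (sk ++ (s ++ r2)) := by
          simp [List.append_assoc]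
      _ = t.take i ++ (sk ++ r1) := by rw [hu, hr2]
      _ = t.take i ++ t.drop i := by rw [hr1]
      _ = t := List.take_append_drop i t

-- bridging B's position-scan existence to A's substring test, one group at a time
lemma any_range_eq (t sk : List Char) (g : List (List Char × List Char × Int)) :
    (List.range (t.length + 1 - sk.length)).any
        (fun i => PySem.Chars.startswith (t.drop i) sk && g.any (pvCtx t sk i))
      = g.any (fun e => PySem.Chars.isIn (e.1 ++ sk ++ e.2.1) t) := by
  rw [Bool.eq_iff_iff]
  simp only [List.any_eq_true, List.mem_range, Bool.and_eq_true, pvCtx,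
    PySem.Chars.isIn_iff_infix, entry_iff]
  constructor
  · rintro ⟨i, hi, hs, e, he, h1, h2⟩
    exact ⟨e, he, i, hi, hs, h1, h2⟩
  · rintro ⟨e, he, i, hi, hs, h1, h2⟩
    exact ⟨i, hi, hs, e, he, h1, h2⟩

-- ===== VERDICT (by name: the statement is the Claim_ definition above) =====
theorem estimate_proficiency_py_spec : Claim_equal_estimate_proficiency_py := by
  intro skill text _
  show _ = _
  simp only [estimate_proficiency_py, estimate_proficiency_py_alt]
  rw [foldl_pvStep text.toList skill.toList _ _ (by omega),
      max_eq_right (neg_one_le_pvMR _ _ _)]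
  simp only [pvMR]
  simp only [any_range_eq, scanA_eq_any]
  simp only [pvG0, pvG1, pvG2, pvG3, List.any_cons, List.any_nil,
    PySem.Str.isIn_eq, String.toList_append, List.append_assoc,
    List.append_nil, List.nil_append, Bool.or_false]
  exact pvFinal_cascade _ _ _ _
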